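-- pv_equiv track=rewrite | github.com/KulaPrakash6417/Baseline-JPEG-Compression-from-Scratch | encoder/huffman_encode.py | magnitude_category
-- ===== SOURCE A (Python) =====
-- def magnitude_category(value):
--     """
--     Compute JPEG magnitude category and bit representation
--     """
--     value = int(value)
--
--     if value == 0:
--         return 0, ""
--
--     abs_val = abs(value)
--     category = abs_val.bit_length()
--     bits = format(abs_val, f'0{category}b')
--
--     if value < 0:
--         bits = ''.join('1' if b == '0' else '0' for b in bits)
--
--     return category, bits
-- ===== SOURCE B (Python) =====
-- def magnitude_category(value):
--     value = int(value)
--     if value == 0: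
--         return 0, ""
--     a = abs(value)
--     neg = value < 0
--     bits = ""
--     while a:
--         bits = str((a & 1) ^ neg) + bits
--         a >>= 1
--     return len(bits), bits
-- ===== Notes on version B (the rewrite author's own statement) =====
-- stated objective: simpler
-- what changed: Replaces bit_length + zero-padded format + a per-character inversion comprehension by a single divmod loop that builds the bit string back-to-front, emitting each bit already complemented for negative values, with the category read off as the string length.
import Mathlib
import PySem

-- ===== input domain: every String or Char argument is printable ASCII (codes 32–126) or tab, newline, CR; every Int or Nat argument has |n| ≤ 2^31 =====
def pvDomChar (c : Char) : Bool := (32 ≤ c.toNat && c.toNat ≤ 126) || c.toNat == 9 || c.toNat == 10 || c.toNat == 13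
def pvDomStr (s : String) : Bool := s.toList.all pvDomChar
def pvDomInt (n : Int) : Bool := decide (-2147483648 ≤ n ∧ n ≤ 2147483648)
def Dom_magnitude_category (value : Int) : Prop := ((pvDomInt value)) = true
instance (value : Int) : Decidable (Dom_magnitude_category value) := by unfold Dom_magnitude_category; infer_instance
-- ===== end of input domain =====

-- B replaces bit_length + format + per-character inversion by one back-to-front divmod loop
-- that emits each (possibly complemented) bit directly; objective: simpler, same cost.

-- ===== PORT A =====
def magnitude_category (value : Int) : Int × String :=
  -- value = int(value) is the identity on an Int argument
  if value = 0 then (0, "")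
  else
    let absVal : Int := |value|
    let category : Nat := PySem.Int.bitLength absVal
    let bits : String := PySem.Str.zfill (PySem.Int.toBin absVal) (category : Int)
    let bits : String :=
      if value < 0 then
        String.ofList (bits.toList.map (fun b => if b = '0' then '1' else '0'))
      else bits
    ((category : Int), bits)

-- ===== PORT B =====
-- the 'while a:' loop of Source B: prepend str((a & 1) ^ neg), halve a
def mcLoop (neg : Bool) (a : Nat) (bits : List Char) : List Char :=
  if a = 0 then bits
  else mcLoop neg (a / 2) ((if ((a % 2 == 1)).xor neg then '1' else '0') :: bits)
decreasing_by exact Nat.div_lt_self (by omega) (by omega)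

def magnitude_category_alt (value : Int) : Int × String :=
  if value = 0 then (0, "")
  else
    let bits : List Char := mcLoop (decide (value < 0)) value.natAbs []
    ((bits.length : Int), String.ofList bits)

-- ===== PRECONDITION & SPEC =====
def Spec_magnitude_category (value : Int) (out : Int × String) : Prop := out = magnitude_category_alt value
instance (value : Int) (out : Int × String) : Decidable (Spec_magnitude_category value out) := by unfold Spec_magnitude_category; infer_instance

-- ===== CLAIM (what is proved, stated in full; the proofs are below) =====
def Claim_equal_magnitude_category : Prop := ∀ (value : Int), Dom_magnitude_category value → Spec_magnitude_category value (magnitude_category value)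

-- ===== LEMMAS AND PROOFS =====

-- binary digits of n (most significant first), the common shape of both ports' strings
def bChars (n : Nat) : List Char :=
  if n < 2 then [Nat.digitChar n] else bChars (n / 2) ++ [Nat.digitChar (n % 2)]
decreasing_by exact Nat.div_lt_self (by omega) (by omega)

def invChar (c : Char) : Char := if c = '0' then '1' else '0'

theorem toDigitsCore_eq_bChars (f : Nat) : ∀ (n : Nat) (acc : List Char), n < f →
    Nat.toDigitsCore 2 f n acc = bChars n ++ acc := by
  induction f with
  | zero => intro n acc h; omega
  | succ f ih =>
    intro n acc h
    rw [Nat.toDigitsCore]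
    by_cases h2 : n / 2 = 0
    · have hn2 : n < 2 := by omega
      rw [bChars]
      simp [h2, hn2, Nat.mod_eq_of_lt hn2]
    · have hge : 2 ≤ n := by omega
      rw [if_neg h2, ih (n / 2) _ (by omega)]
      conv_rhs => rw [bChars, if_neg (show ¬ n < 2 by omega)]
      simp

theorem toDigits_eq_bChars (n : Nat) : Nat.toDigits 2 n = bChars n :=
  (toDigitsCore_eq_bChars (n + 1) n [] (by omega)).trans (by simp)

theorem length_bChars (n : Nat) (h : 0 < n) : (bChars n).length = PySem.Int.bitLength (n : Int) := by
  induction n using Nat.strong_induction_on with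
  | _ n ih =>
    by_cases h2 : n < 2
    · have : n = 1 := by omega
      subst this
      rw [bChars]
      decide
    · rw [bChars, if_neg h2, PySem.Int.bitLength_natCast h]
      have := ih (n / 2) (Nat.div_lt_self h (by omega)) (by omega)
      simp [this]

theorem mcLoop_eq (neg : Bool) (n : Nat) (h : 0 < n) (acc : List Char) :
    mcLoop neg n acc = (if neg then (bChars n).map invChar else bChars n) ++ acc := by
  induction n using Nat.strong_induction_on generalizing acc with
  | _ n ih =>
    rw [mcLoop, if_neg (by omega)]
    by_cases h2 : n < 2
    · have h1 : n = 1 := by omega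
      subst h1
      have h0 : (1 : Nat) / 2 = 0 := by decide
      rw [h0, mcLoop, if_pos rfl, bChars]
      cases neg <;> simp [invChar, Nat.digitChar]
    · rw [ih (n / 2) (Nat.div_lt_self (by omega) (by omega)) (by omega)]
      conv_rhs => rw [bChars, if_neg h2]
      have hm : n % 2 = 0 ∨ n % 2 = 1 := by omega
      cases neg <;> rcases hm with hm | hm <;>
        simp [hm, invChar, Nat.digitChar]

theorem magnitude_category_spec : Claim_equal_magnitude_category := by
  intro value _
  unfold Spec_magnitude_category magnitude_category magnitude_category_alt
  by_cases h0 : value = 0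
  · simp [h0]
  · rw [if_neg h0, if_neg h0]
    have hm : 0 < value.natAbs := by omega
    have habs : |value| = (value.natAbs : Int) := by
      exact Int.abs_eq_natAbs value
    have hbin : PySem.Int.toBin ((value.natAbs : Int)) = String.ofList (bChars value.natAbs) := by
      unfold PySem.Int.toBin PySem.Int.toBinChars
      rw [if_neg (by simp)]
      rw [Int.toNat_natCast, toDigits_eq_bChars]
    have hlen : (bChars value.natAbs).length = PySem.Int.bitLength ((value.natAbs : Int)) := length_bChars _ hm
    have hzfill : PySem.Str.zfill (String.ofList (bChars value.natAbs))
        ((PySem.Int.bitLength ((value.natAbs : Int)) : Int)) = String.ofList (bChars value.natAbs) := by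
      unfold PySem.Str.zfill PySem.Chars.zfill
      rw [if_pos (by simp [String.toList_ofList, hlen])]
      simp [String.toList_ofList]
    rw [mcLoop_eq _ _ hm]
    by_cases hneg : value < 0
    · have : decide (value < 0) = true := by simpa using hneg
      rw [this]
      simp only [habs, hbin, hzfill, if_pos hneg]
      refine Prod.ext ?_ ?_
      · simp [hlen]
      · simp only [String.toList_ofList, if_true, List.append_nil]
        rfl
    · have : decide (value < 0) = false := by simpa using hneg
      rw [this]
      simp only [habs, hbin, hzfill, if_neg hneg]
      refine Prod.ext ?_ ?_
      · simp [hlen]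
      · simp
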